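-- pv_equiv track=rewrite | github.com/Aroize/Neural-Collaborative-Filtering-PyTorch | ncf/dataset.py | reindex_data
-- ===== SOURCE A (Python) =====
-- def reindex_data(data_samples):
--     user_mapper = {}
--     item_mapper = {}
--     reindexed_data = []
--     for user, item in data_samples:
--         uid = insert(user, user_mapper)
--         iid = insert(item, item_mapper)
--         reindexed_data.append((uid, iid))
--     return (reindexed_data, user_mapper, item_mapper)
--
-- def insert(idx, idx_dict):
--     if idx not in idx_dict:
--         new_idx = len(idx_dict)
--         idx_dict[idx] = new_idx
--     else:
--         new_idx = idx_dict[idx]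
--     return new_idx
-- ===== SOURCE B (Python) =====
-- def reindex_data(data_samples):
--     samples = list(data_samples)
--     users = list(dict.fromkeys(u for u, _ in samples))
--     items = list(dict.fromkeys(i for _, i in samples))
--     user_mapper = {u: n for n, u in enumerate(users)}
--     item_mapper = {i: n for n, i in enumerate(items)}
--     reindexed_data = [(user_mapper[u], item_mapper[i]) for u, i in samples]
--     return (reindexed_data, user_mapper, item_mapper)
-- ===== Notes on version B (the rewrite author's own statement) =====
-- stated objective: alternative
-- what changed: Instead of incrementally assigning ids with a len(dict) counter inside the loop, B first materializes the distinct users and items in first-occurrence order via dict.fromkeys and defines each id as the key's POSITION in that dedup list (enumerate), then remaps the pairs by lookup.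
import Mathlib
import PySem

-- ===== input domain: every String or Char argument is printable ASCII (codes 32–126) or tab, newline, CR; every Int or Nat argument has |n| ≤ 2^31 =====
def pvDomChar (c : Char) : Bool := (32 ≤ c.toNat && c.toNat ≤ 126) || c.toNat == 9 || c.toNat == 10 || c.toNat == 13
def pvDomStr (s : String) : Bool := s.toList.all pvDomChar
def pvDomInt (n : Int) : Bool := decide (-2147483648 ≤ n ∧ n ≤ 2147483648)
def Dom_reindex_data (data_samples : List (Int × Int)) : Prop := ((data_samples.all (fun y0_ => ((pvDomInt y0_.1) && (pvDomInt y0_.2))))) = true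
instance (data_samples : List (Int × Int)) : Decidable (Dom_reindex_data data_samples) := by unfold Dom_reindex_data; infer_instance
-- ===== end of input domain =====

-- B replaces A's incremental len(dict)-counter id assignment by a dedup-then-enumerate
-- scheme: ids are positions in the first-occurrence dedup list (alternative decomposition, same cost).

-- ===== PORT A =====
-- Python's insert(idx, idx_dict): returns the id and the updated dict (dict mutation made explicit).
def insertA (idx : Int) (idx_dict : PySem.Dict Int Int) : Int × PySem.Dict Int Int :=
  if idx_dict.contains idx = false then
    let new_idx : Int := (idx_dict.size : Int)
    (new_idx, idx_dict.insert idx new_idx)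
  else
    (idx_dict.getD idx 0, idx_dict)   -- key is present, so getD returns the stored value (no KeyError)

-- the for-loop of A, state = (reindexed_data, user_mapper, item_mapper)
def loopA : List (Int × Int) → List (Int × Int) → PySem.Dict Int Int → PySem.Dict Int Int →
    (List (Int × Int)) × PySem.Dict Int Int × PySem.Dict Int Int
  | [], acc, um, im => (acc, um, im)
  | (user, item) :: rest, acc, um, im =>
      let p := insertA user um
      let q := insertA item im
      loopA rest (acc ++ [(p.1, q.1)]) p.2 q.2

def reindex_data (data_samples : List (Int × Int)) : (List (Int × Int)) × (List (Int × Int)) × (List (Int × Int)) :=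
  let r := loopA data_samples [] PySem.Dict.empty PySem.Dict.empty
  (r.1, r.2.1.items, r.2.2.items)

-- ===== PORT B =====
-- {k: n for n, k in enumerate(keys)} — dict comprehension over an enumerated list
def comprMapper (keys : List Int) : PySem.Dict Int Int :=
  (PySem.List.enumerate keys 0).foldl (fun d p => d.insert p.2 p.1) PySem.Dict.empty

def reindex_data_alt (data_samples : List (Int × Int)) : (List (Int × Int)) × (List (Int × Int)) × (List (Int × Int)) :=
  let users := PySem.List.dedup (data_samples.map (·.1))   -- list(dict.fromkeys(...))
  let items := PySem.List.dedup (data_samples.map (·.2))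
  let user_mapper := comprMapper users
  let item_mapper := comprMapper items
  -- user_mapper[u] / item_mapper[i]: the keys are always present, so getD returns the stored value (no KeyError)
  (data_samples.map (fun p => (user_mapper.getD p.1 0, item_mapper.getD p.2 0)),
   user_mapper.items, item_mapper.items)

-- ===== PRECONDITION & SPEC =====
def Spec_reindex_data (data_samples : List (Int × Int)) (out : (List (Int × Int)) × (List (Int × Int)) × (List (Int × Int))) : Prop := out = reindex_data_alt data_samples
instance (data_samples : List (Int × Int)) (out : (List (Int × Int)) × (List (Int × Int)) × (List (Int × Int))) : Decidable (Spec_reindex_data data_samples out) := by unfold Spec_reindex_data; infer_instance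

-- ===== CLAIM (what is proved, stated in full; the proofs are below) =====
def Claim_equal_reindex_data : Prop := ∀ (data_samples : List (Int × Int)), Dom_reindex_data data_samples → Spec_reindex_data data_samples (reindex_data data_samples)

-- ===== LEMMAS AND PROOFS =====

-- one step of A's id-assignment on a mapper
def stepM (d : PySem.Dict Int Int) (x : Int) : PySem.Dict Int Int :=
  if d.contains x = true then d else d.insert x (d.size : Int)

lemma insertA_eq (x : Int) (d : PySem.Dict Int Int) :
    insertA x d = ((stepM d x).getD x 0, stepM d x) := by
  by_cases h : d.contains x = true
  · simp [insertA, stepM, h]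
  · simp only [insertA, stepM, eq_false_of_ne_true h, if_true]
    simp [PySem.Dict.getD_insert_self]

lemma contains_stepM_self (d : PySem.Dict Int Int) (x : Int) : (stepM d x).contains x = true := by
  by_cases h : d.contains x = true
  · simp [stepM, h]
  · simp [stepM, h, PySem.Dict.contains_insert_self]

lemma getD_foldl_stepM_stable (xs : List Int) (d : PySem.Dict Int Int) (k : Int)
    (h : d.contains k = true) : (xs.foldl stepM d).getD k 0 = d.getD k 0 := by
  induction xs generalizing d with
  | nil => rfl
  | cons x xs ih =>
    by_cases hx : d.contains x = true
    · rw [List.foldl_cons, show stepM d x = d from by simp [stepM, hx], ih d h]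
    · have hne : k ≠ x := fun e => hx (e ▸ h)
      rw [List.foldl_cons, show stepM d x = d.insert x (d.size : Int) from by simp [stepM, hx]]
      rw [ih _ (by simp [PySem.Dict.contains_insert, h]),
          PySem.Dict.getD_insert_of_ne d _ _ hne]

-- the items of A's mapper after processing a prefix with distinct-keys list `seen`
lemma items_foldl_stepM (xs : List Int) : ∀ (seen : List Int) (d : PySem.Dict Int Int),
    seen.Nodup → d.items = (PySem.List.enumerate seen 0).map (fun p => (p.2, p.1)) →
    (xs.foldl stepM d).items =
      (PySem.List.enumerate (PySem.Set.update seen xs) 0).map (fun p => (p.2, p.1)) := by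
  induction xs with
  | nil => intro seen d _ hd; simpa [PySem.Set.update_nil] using hd
  | cons x xs ih =>
    intro seen d hnd hd
    have hkeys : d.keys = seen := by
      simp only [PySem.Dict.keys, hd, List.map_map]
      exact PySem.List.map_snd_enumerate seen 0
    have hcontains : d.contains x = decide (x ∈ seen) := by
      rw [PySem.Dict.contains_eq_decide_mem_keys, hkeys]
    by_cases hx : x ∈ seen
    · have hstep : stepM d x = d := by simp [stepM, hcontains, hx]
      rw [List.foldl_cons, hstep, PySem.Set.update_cons, PySem.Set.add_of_mem hx]
      exact ih seen d hnd hd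
    · have hsize : d.size = seen.length := by
        simp [PySem.Dict.size, hd, PySem.List.length_enumerate]
      have hstep : stepM d x = d.insert x (seen.length : Int) := by
        simp [stepM, hcontains, hx, hsize]
      rw [List.foldl_cons, hstep, PySem.Set.update_cons, PySem.Set.add_of_not_mem hx]
      refine ih (seen ++ [x]) _
        (by simp only [List.nodup_append]
            refine ⟨hnd, List.nodup_singleton x, ?_⟩
            intro a ha b hb
            rw [List.mem_singleton] at hb
            subst hb
            exact fun e => hx (e ▸ ha)) ?_
      rw [PySem.Dict.items_insert_of_not_contains _ _ (by simp [hcontains, hx]), hd]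
      simp [PySem.List.enumerate_append, PySem.List.enumerate_cons]

-- the items of B's comprehension mapper over a Nodup key list
lemma items_comprMapper (keys : List Int) (hnd : keys.Nodup) :
    (comprMapper keys).items = (PySem.List.enumerate keys 0).map (fun p => (p.2, p.1)) := by
  unfold comprMapper
  have h := PySem.Dict.items_foldl_insert_fresh (l := PySem.List.enumerate keys 0)
      (k := fun p : Int × Int => p.2) (v := fun p : Int × Int => p.1) (d := PySem.Dict.empty)
      (by intro a _; exact PySem.Dict.contains_empty _)
      (by rw [PySem.List.map_snd_enumerate]; exact hnd)
  exact h.trans (by rfl)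

-- the two mappers coincide as dicts
lemma foldl_stepM_eq_comprMapper (xs : List Int) :
    xs.foldl stepM PySem.Dict.empty = comprMapper (PySem.List.dedup xs) := by
  apply PySem.Dict.ext
  rw [items_comprMapper _ (by simpa using PySem.Set.nodup_ofList xs)]
  have h := items_foldl_stepM xs [] PySem.Dict.empty List.nodup_nil rfl
  rw [PySem.Set.update_nil_left] at h
  exact h

lemma loopA_eq (l : List (Int × Int)) : ∀ (acc : List (Int × Int)) (um im : PySem.Dict Int Int),
    loopA l acc um im =
      (acc ++ l.map (fun p => (((l.map (·.1)).foldl stepM um).getD p.1 0,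
                               ((l.map (·.2)).foldl stepM im).getD p.2 0)),
       (l.map (·.1)).foldl stepM um, (l.map (·.2)).foldl stepM im) := by
  induction l with
  | nil => intro acc um im; simp [loopA]
  | cons p rest ih =>
    intro acc um im
    obtain ⟨u, i⟩ := p
    rw [loopA, insertA_eq, insertA_eq, ih]
    simp only [List.map_cons, List.foldl_cons]
    rw [getD_foldl_stepM_stable _ _ _ (contains_stepM_self um u),
        getD_foldl_stepM_stable _ _ _ (contains_stepM_self im i)]
    simp

-- ===== VERDICT (by name: the statement is the Claim_ definition above) =====
theorem reindex_data_spec : Claim_equal_reindex_data := by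
  intro ds _
  show reindex_data ds = reindex_data_alt ds
  unfold reindex_data reindex_data_alt
  rw [loopA_eq]
  simp only [foldl_stepM_eq_comprMapper]
  simp
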